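-- pv_equiv track=rewrite | github.com/karlprink/Data-Scraper-and-CRM-Updater | api/sync.py | get_emtak_section_text
-- ===== SOURCE A (Python) =====
-- from typing import Tuple, Dict, Any, Optional
--
-- EMTAK_RANGES = [
--     (1, 3, "Põllumajandus, metsamajandus ja kalapüük"),
--     (5, 9, "Mäetööstus"),
--     (10, 33, "Töötlev tööstus"),
--     (35, 35, "Elektrienergia, gaasi, auru ja konditsioneeritud õhuga varustamine"),
--     (36, 39, "Veevarustus; kanalisatsioon, jäätme- ja saastekäitlus"),
--     (41, 43, "Ehitus"),
--     (45, 47, "Hulgi- ja jaekaubandus; mootorsõidukite ja mootorrataste remont"),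
--     (49, 53, "Veondus ja laondus"),
--     (55, 56, "Majutus ja toitlustus"),
--     (58, 63, "Info ja side"),
--     (64, 66, "Finants- ja kindlustustegevus"),
--     (68, 68, "Kinnisvaraalane tegevus"),
--     (69, 75, "Kutse-, teadus- ja tehnikaalane tegevus"),
--     (77, 82, "Haldus- ja abitegevused"),
--     (84, 84, "Avalik haldus ja riigikaitse; kohustuslik sotsiaalkindlustus"),
--     (85, 85, "Haridus"),
--     (86, 88, "Tervishoid ja sotsiaalhoolekanne"),
--     (90, 93, "Kunst, meelelahutus ja vaba aeg"),
--     (94, 96, "Muud teenindavad tegevused"),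
--     (
--         97,
--         98,
--         "Kodumajapidamiste kui tööandjate tegevus; kodumajapidamiste oma tarbeks tootmine",
--     ),
--     (99, 99, "Eksterritoriaalsete organisatsioonide ja üksuste tegevus"),
-- ]
--
-- def get_emtak_section_text(emtak_code: Optional[str]) -> Optional[str]:
--     """
--     Finds the broader industry section (Tegevusvaldkond) based on the first
--     two digits of the EMTAK code using the EMTAK_RANGES.
--     Returns format: "01-03: Section Name" (Commas replaced by semicolons for Notion)
--     """
--     if not emtak_code:
--         return None
--
--     # Filter out non-digit characters to be safe
--     cleaned_code = "".join(filter(str.isdigit, str(emtak_code)))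
--
--     if len(cleaned_code) >= 2:
--         try:
--             # Take the first 2 digits and convert to integer for range comparison
--             code_int = int(cleaned_code[:2])
--
--             for start, end, name in EMTAK_RANGES:
--                 if start <= code_int <= end:
--                     range_str = (
--                         f"{start:02d}-{end:02d}" if start != end else f"{start:02d}"
--                     )
--
--                     safe_name = name.replace(",", ";")
--
--                     return f"{range_str}: {safe_name}"
--
--         except ValueError:
--             return None
--
--     return None
-- ===== SOURCE B (Python) =====
-- from typing import Tuple, Dict, Any, Optional
--
-- EMTAK_RANGES = [
--     (1, 3, "Põllumajandus, metsamajandus ja kalapüük"),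
--     (5, 9, "Mäetööstus"),
--     (10, 33, "Töötlev tööstus"),
--     (35, 35, "Elektrienergia, gaasi, auru ja konditsioneeritud õhuga varustamine"),
--     (36, 39, "Veevarustus; kanalisatsioon, jäätme- ja saastekäitlus"),
--     (41, 43, "Ehitus"),
--     (45, 47, "Hulgi- ja jaekaubandus; mootorsõidukite ja mootorrataste remont"),
--     (49, 53, "Veondus ja laondus"),
--     (55, 56, "Majutus ja toitlustus"),
--     (58, 63, "Info ja side"),
--     (64, 66, "Finants- ja kindlustustegevus"),
--     (68, 68, "Kinnisvaraalane tegevus"),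
--     (69, 75, "Kutse-, teadus- ja tehnikaalane tegevus"),
--     (77, 82, "Haldus- ja abitegevused"),
--     (84, 84, "Avalik haldus ja riigikaitse; kohustuslik sotsiaalkindlustus"),
--     (85, 85, "Haridus"),
--     (86, 88, "Tervishoid ja sotsiaalhoolekanne"),
--     (90, 93, "Kunst, meelelahutus ja vaba aeg"),
--     (94, 96, "Muud teenindavad tegevused"),
--     (
--         97,
--         98,
--         "Kodumajapidamiste kui tööandjate tegevus; kodumajapidamiste oma tarbeks tootmine",
--     ),
--     (99, 99, "Eksterritoriaalsete organisatsioonide ja üksuste tegevus"),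
-- ]
--
-- # Precomputed table: every covered two-digit prefix -> its finished section label.
-- LOOKUP: Dict[int, str] = {}
-- for _start, _end, _name in EMTAK_RANGES:
--     _label = (
--         (f"{_start:02d}-{_end:02d}" if _start != _end else f"{_start:02d}")
--         + ": "
--         + _name.replace(",", ";")
--     )
--     for _code in range(_start, _end + 1):
--         LOOKUP[_code] = _label
--
--
-- def get_emtak_section_text(emtak_code: Optional[str]) -> Optional[str]:
--     if not emtak_code:
--         return None
--     cleaned = "".join(ch for ch in str(emtak_code) if ch.isdigit())
--     if len(cleaned) < 2:
--         return None
--     return LOOKUP.get(int(cleaned[:2]))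
-- ===== Notes on version B (the rewrite author's own statement) =====
-- stated objective: idiomatic
-- what changed: Replaces the per-call linear scan over EMTAK_RANGES (with formatting done inside the hit branch) by a module-scope dict precomputed once (every covered two-digit prefix mapped to its finished label) so the function body is guards plus a single dict lookup.
import Mathlib
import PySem

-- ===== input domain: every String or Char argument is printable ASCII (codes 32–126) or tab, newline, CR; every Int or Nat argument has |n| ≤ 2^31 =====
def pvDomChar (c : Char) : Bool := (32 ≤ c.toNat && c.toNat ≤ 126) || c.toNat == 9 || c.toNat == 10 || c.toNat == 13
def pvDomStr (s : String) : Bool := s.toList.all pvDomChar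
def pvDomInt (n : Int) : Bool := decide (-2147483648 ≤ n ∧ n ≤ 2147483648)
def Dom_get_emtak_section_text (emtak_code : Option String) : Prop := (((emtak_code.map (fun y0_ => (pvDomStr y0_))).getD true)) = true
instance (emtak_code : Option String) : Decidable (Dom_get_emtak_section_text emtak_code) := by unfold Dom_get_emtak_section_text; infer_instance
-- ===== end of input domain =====

-- B replaces A's linear scan over EMTAK_RANGES with a table precomputed once at module
-- scope (every covered two-digit prefix -> its finished label) and a single dict lookup;
-- objective: idiomatic (one hash lookup instead of a scan with per-hit formatting).

-- shared module data (the Python module constant EMTAK_RANGES, used by both programs)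
def EMTAK_RANGES : List (Int × Int × String) := [
  (1, 3, "Põllumajandus, metsamajandus ja kalapüük"),
  (5, 9, "Mäetööstus"),
  (10, 33, "Töötlev tööstus"),
  (35, 35, "Elektrienergia, gaasi, auru ja konditsioneeritud õhuga varustamine"),
  (36, 39, "Veevarustus; kanalisatsioon, jäätme- ja saastekäitlus"),
  (41, 43, "Ehitus"),
  (45, 47, "Hulgi- ja jaekaubandus; mootorsõidukite ja mootorrataste remont"),
  (49, 53, "Veondus ja laondus"),
  (55, 56, "Majutus ja toitlustus"),
  (58, 63, "Info ja side"),
  (64, 66, "Finants- ja kindlustustegevus"),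
  (68, 68, "Kinnisvaraalane tegevus"),
  (69, 75, "Kutse-, teadus- ja tehnikaalane tegevus"),
  (77, 82, "Haldus- ja abitegevused"),
  (84, 84, "Avalik haldus ja riigikaitse; kohustuslik sotsiaalkindlustus"),
  (85, 85, "Haridus"),
  (86, 88, "Tervishoid ja sotsiaalhoolekanne"),
  (90, 93, "Kunst, meelelahutus ja vaba aeg"),
  (94, 96, "Muud teenindavad tegevused"),
  (97, 98, "Kodumajapidamiste kui tööandjate tegevus; kodumajapidamiste oma tarbeks tootmine"),
  (99, 99, "Eksterritoriaalsete organisatsioonide ja üksuste tegevus")]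

-- f"{n:02d}" for the nonnegative numbers appearing in EMTAK_RANGES (= str(n).zfill(2))
def fmt02 (n : Int) : List Char := PySem.Chars.zfill (PySem.Int.toChars n) 2

-- ===== PORT A =====
-- the 'for start, end, name in EMTAK_RANGES' scan with early return
def emtakScanA : List (Int × Int × String) → Int → Option String
  | [], _ => none
  | (s, e, name) :: rest, n =>
    if s ≤ n ∧ n ≤ e then
      let rangeStr : List Char := if s ≠ e then fmt02 s ++ ['-'] ++ fmt02 e else fmt02 s
      let safeName : List Char := PySem.Chars.replace name.toList [','] [';']
      some (String.ofList (rangeStr ++ [':', ' '] ++ safeName))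
    else emtakScanA rest n

def get_emtak_section_text (emtak_code : Option String) : Option String :=
  match emtak_code with
  | none => none                    -- 'if not emtak_code'
  | some s =>
    if s.toList = [] then none      -- 'if not emtak_code' (empty string)
    else
      let cleaned := s.toList.filter PySem.Chars.isdigit
      if 2 ≤ cleaned.length then
        match PySem.Int.ofChars? (PySem.List.slice cleaned none (some 2)) with
        | some n => emtakScanA EMTAK_RANGES n
        | none => none              -- 'except ValueError: return None'
      else none

-- ===== PORT B =====
def emtakLabelB (s e : Int) (name : String) : String :=
  String.ofList ((if s ≠ e then fmt02 s ++ ['-'] ++ fmt02 e else fmt02 s) ++ [':', ' ']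
    ++ PySem.Chars.replace name.toList [','] [';'])

-- the module-scope LOOKUP dict: every covered two-digit prefix -> finished label
def LOOKUP : PySem.Dict Int String :=
  EMTAK_RANGES.foldl (fun d t =>
    let label := emtakLabelB t.1 t.2.1 t.2.2
    (PySem.List.pyRange t.1 (t.2.1 + 1) 1).foldl (fun d c => d.insert c label) d)
    PySem.Dict.empty

def get_emtak_section_text_alt (emtak_code : Option String) : Option String :=
  match emtak_code with
  | none => none
  | some s =>
    if s.toList = [] then none
    else
      let cleaned := s.toList.filter PySem.Chars.isdigit
      if cleaned.length < 2 then none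
      else
        (PySem.Int.ofChars? (PySem.List.slice cleaned none (some 2))).bind
          (fun n => PySem.Dict.get? LOOKUP n)   -- 'return LOOKUP.get(int(cleaned[:2]))'

-- ===== PRECONDITION & SPEC =====
def Spec_get_emtak_section_text (emtak_code : Option String) (out : Option String) : Prop := out = get_emtak_section_text_alt emtak_code
instance (emtak_code : Option String) (out : Option String) : Decidable (Spec_get_emtak_section_text emtak_code out) := by unfold Spec_get_emtak_section_text; infer_instance

-- ===== CLAIM (what is proved, stated in full; the proofs are below) =====
def Claim_equal_get_emtak_section_text : Prop := ∀ (emtak_code : Option String), Dom_get_emtak_section_text emtak_code → Spec_get_emtak_section_text emtak_code (get_emtak_section_text emtak_code)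

-- ===== LEMMAS AND PROOFS =====

lemma digit_cases (c : Char) (h : PySem.Chars.isdigit c = true) :
    c = '0' ∨ c = '1' ∨ c = '2' ∨ c = '3' ∨ c = '4' ∨ c = '5' ∨ c = '6' ∨ c = '7' ∨ c = '8' ∨ c = '9' := by
  simp [PySem.Chars.isdigit, Char.le_def, UInt32.le_iff_toNat_le] at h
  have hc : c = Char.ofNat c.toNat := (Char.ofNat_toNat c).symm
  obtain ⟨h1, h2⟩ : 48 ≤ c.toNat ∧ c.toNat ≤ 57 := h
  set n := c.toNat with hn
  interval_cases n <;> simp [hc]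

set_option maxRecDepth 40000 in
lemma parse_two (c d : Char) (hc : PySem.Chars.isdigit c = true) (hd : PySem.Chars.isdigit d = true) :
    ∃ n : Int, PySem.Int.ofChars? [c, d] = some n ∧ 0 ≤ n ∧ n < 100 := by
  rcases digit_cases c hc with rfl | rfl | rfl | rfl | rfl | rfl | rfl | rfl | rfl | rfl <;>
    rcases digit_cases d hd with rfl | rfl | rfl | rfl | rfl | rfl | rfl | rfl | rfl | rfl <;>
    exact ⟨_, rfl, by decide, by decide⟩

set_option maxRecDepth 100000 in
lemma scan_eq_lookup (n : Int) (h0 : 0 ≤ n) (h99 : n < 100) :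
    emtakScanA EMTAK_RANGES n = PySem.Dict.get? LOOKUP n := by
  obtain ⟨k, rfl⟩ : ∃ k : Nat, n = (k : Int) := ⟨n.toNat, (Int.toNat_of_nonneg h0).symm⟩
  have hk : k < 100 := by exact_mod_cast h99
  interval_cases k <;> decide

-- ===== VERDICT (by name: the statement is the Claim_ definition above) =====
theorem get_emtak_section_text_spec : Claim_equal_get_emtak_section_text := by
  intro x _
  unfold Spec_get_emtak_section_text
  match x with
  | none => rfl
  | some s =>
    show get_emtak_section_text (some s) = get_emtak_section_text_alt (some s)
    unfold get_emtak_section_text get_emtak_section_text_alt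
    by_cases he : s.toList = ([] : List Char)
    · simp [he]
    · simp only [he, if_neg, not_false_iff]
      set cleaned := s.toList.filter PySem.Chars.isdigit with hcl
      by_cases hlen : 2 ≤ cleaned.length
      · have hlt : ¬ cleaned.length < 2 := by omega
        simp only [if_pos hlen, if_neg hlt]
        have hslice : PySem.List.slice cleaned none (some (2 : Int)) = cleaned.take 2 := by
          simpa using PySem.List.slice_to_natCast (xs := cleaned) (b := 2)
        obtain ⟨c, rest, hc1⟩ := List.exists_cons_of_ne_nil
          (l := cleaned) (by intro h; rw [h] at hlen; simp at hlen)
        obtain ⟨d, t, hd1⟩ := List.exists_cons_of_ne_nil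
          (l := rest) (by intro h; rw [hc1, h] at hlen; simp at hlen)
        have htake : cleaned.take 2 = [c, d] := by rw [hc1, hd1]; rfl
        have hcdig : PySem.Chars.isdigit c = true :=
          (List.mem_filter.mp (by rw [← hcl, hc1]; exact List.mem_cons_self)).2
        have hddig : PySem.Chars.isdigit d = true :=
          (List.mem_filter.mp (by rw [← hcl, hc1, hd1]; exact List.mem_cons_of_mem _ List.mem_cons_self)).2
        obtain ⟨n, hn, h0, h99⟩ := parse_two c d hcdig hddig
        rw [hslice, htake, hn]
        simpa using scan_eq_lookup n h0 h99
      · have hlt : cleaned.length < 2 := by omega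
        simp only [if_neg hlen, if_pos hlt]
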